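-- pv_equiv track=rewrite | github.com/Wangszjl/SCDAT | scripts/python/generate_surface_spis_class_audit.py | resolve_family
-- ===== SOURCE A (Python) =====
-- FAMILY_RULES = [
--     ("Surf/Material/", "surf_material", "Surf/Material"),
--     ("Surf/SurfInteract/", "surf_interact", "Surf/SurfInteract"),
--     ("Surf/SurfDistrib/", "surf_distrib", "Surf/SurfDistrib"),
--     ("Surf/SurfField/", "surf_field", "Surf/SurfField"),
--     ("Surf/SurfMesh/", "surf_mesh", "Surf/SurfMesh"),
--     ("Circ/CircField/", "circ_circfield", "Circ/CircField"),
--     ("Circ/DIDV/", "circ_didv", "Circ/DIDV"),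
--     ("Circ/Circ/", "circ_circuit", "Circ/Circ"),
--     ("Solver/Circuit/", "solver_circuit", "Solver/Circuit"),
--     ("Solver/ElectroMag/", "solver_electromag", "Solver/ElectroMag"),
--     ("Solver/Matter/", "solver_matter", "Solver/Matter"),
--     ("Solver/Util/", "solver_util", "Solver/Util"),
--     ("Top/Transition/", "top_transition", "Top/Transition"),
--     ("Top/Simulation/", "top_simulation", "Top/Simulation"),
--     ("Top/Plasma/", "top_plasma", "Top/Plasma"),
--     ("Top/SC/", "top_sc", "Top/SC"),
--     ("Top/Grid/", "top_grid", "Top/Grid"),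
--     ("Top/Default/", "top_default", "Top/Default"),
--     ("Top/Top/", "top_top", "Top/Top"),
--     ("Util/DistribFunc/", "util_distrib_func", "Util/DistribFunc"),
--     ("Util/Exception/", "util_exception", "Util/Exception"),
--     ("Util/Instrument/", "util_instrument", "Util/Instrument"),
--     ("Util/Func/", "util_func", "Util/Func"),
--     ("Util/Part/", "util_part", "Util/Part"),
--     ("Util/Phys/", "util_phys", "Util/Phys"),
--     ("Util/Sampler/", "util_sampler", "Util/Sampler"),
--     ("Util/Monitor/", "util_monitor", "Util/Monitor"),
--     ("Util/io/", "util_io", "Util/io"),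
--     ("Util/Table/", "util_table", "Util/Table"),
--     ("Util/Matrix/", "util_matrix", "Util/Matrix"),
--     ("Util/Vect/", "util_vect", "Util/Vect"),
--     ("Util/List/", "util_list", "Util/List"),
--     ("Util/OcTreeMesh/", "util_octree_mesh", "Util/OcTreeMesh"),
--     ("Util/OcTree/", "util_octree", "Util/OcTree"),
--     ("Vol/BC/", "vol_bc_abstract", "Vol/BC(Abstract)"),
--     ("Vol/VolField/", "vol_field_abstract", "Vol/VolField(Abstract)"),
--     ("Vol/VolDistrib/", "vol_distrib_long_tail", "Vol/VolDistrib(LongTail)"),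
--     ("Vol/VolInteract/", "vol_interact_long_tail", "Vol/VolInteract(LongTail)"),
--     ("Vol/Geom/", "vol_geom", "Vol/Geom"),
--     ("Vol/VolMesh/", "vol_mesh", "Vol/VolMesh"),
--     ("Vol/", "vol_full_stack", "Vol/BC+Field+Distrib+Interact"),
-- ]
--
-- def resolve_family(spis_path: str) -> tuple[str, str]:
--     if spis_path.startswith("osgi/"):
--         return "osgi_out_of_scope", "osgi"
--     for prefix, family_id, family_name in FAMILY_RULES:
--         if spis_path.startswith(prefix):
--             return family_id, family_name
--     if spis_path.startswith("Util/"):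
--         return "util_full_stack", "Util/**"
--     raise ValueError(f"Unable to resolve family for {spis_path}")
-- ===== SOURCE B (Python) =====
-- # B resolves by a single dict lookup on the path's two-segment key; the rule
-- # table is kept as compact "key id name" text lines parsed once at import time.
-- _TABLE = (
--     "Surf/Material surf_material Surf/Material",
--     "Surf/SurfInteract surf_interact Surf/SurfInteract",
--     "Surf/SurfDistrib surf_distrib Surf/SurfDistrib",
--     "Surf/SurfField surf_field Surf/SurfField",
--     "Surf/SurfMesh surf_mesh Surf/SurfMesh",
--     "Circ/CircField circ_circfield Circ/CircField",
--     "Circ/DIDV circ_didv Circ/DIDV",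
--     "Circ/Circ circ_circuit Circ/Circ",
--     "Solver/Circuit solver_circuit Solver/Circuit",
--     "Solver/ElectroMag solver_electromag Solver/ElectroMag",
--     "Solver/Matter solver_matter Solver/Matter",
--     "Solver/Util solver_util Solver/Util",
--     "Top/Transition top_transition Top/Transition",
--     "Top/Simulation top_simulation Top/Simulation",
--     "Top/Plasma top_plasma Top/Plasma",
--     "Top/SC top_sc Top/SC",
--     "Top/Grid top_grid Top/Grid",
--     "Top/Default top_default Top/Default",
--     "Top/Top top_top Top/Top",
--     "Util/DistribFunc util_distrib_func Util/DistribFunc",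
--     "Util/Exception util_exception Util/Exception",
--     "Util/Instrument util_instrument Util/Instrument",
--     "Util/Func util_func Util/Func",
--     "Util/Part util_part Util/Part",
--     "Util/Phys util_phys Util/Phys",
--     "Util/Sampler util_sampler Util/Sampler",
--     "Util/Monitor util_monitor Util/Monitor",
--     "Util/io util_io Util/io",
--     "Util/Table util_table Util/Table",
--     "Util/Matrix util_matrix Util/Matrix",
--     "Util/Vect util_vect Util/Vect",
--     "Util/List util_list Util/List",
--     "Util/OcTreeMesh util_octree_mesh Util/OcTreeMesh",
--     "Util/OcTree util_octree Util/OcTree",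
--     "Vol/BC vol_bc_abstract Vol/BC(Abstract)",
--     "Vol/VolField vol_field_abstract Vol/VolField(Abstract)",
--     "Vol/VolDistrib vol_distrib_long_tail Vol/VolDistrib(LongTail)",
--     "Vol/VolInteract vol_interact_long_tail Vol/VolInteract(LongTail)",
--     "Vol/Geom vol_geom Vol/Geom",
--     "Vol/VolMesh vol_mesh Vol/VolMesh"
-- )
--
--
-- def _load_table(lines):
--     table = {}
--     for line in lines:
--         key, fid, fname = line.split()
--         table[key] = (fid, fname)
--     return table
--
--
-- _FAMILY_BY_KEY = _load_table(_TABLE)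
--
--
-- def resolve_family(spis_path: str) -> tuple[str, str]:
--     if spis_path.startswith("osgi/"):
--         return "osgi_out_of_scope", "osgi"
--     parts = spis_path.split("/")
--     if len(parts) >= 3:
--         hit = _FAMILY_BY_KEY.get(parts[0] + "/" + parts[1])
--         if hit is not None:
--             return hit
--     if spis_path.startswith("Vol/"):
--         return "vol_full_stack", "Vol/BC+Field+Distrib+Interact"
--     if spis_path.startswith("Util/"):
--         return "util_full_stack", "Util/**"
--     raise ValueError(f"Unable to resolve family for {spis_path}")
-- ===== Notes on version B (the rewrite author's own statement) =====
-- stated objective: idiomatic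
-- what changed: A scans an ordered list of 41 string prefixes with startswith until one hits; B keeps the rules as a compact text table parsed once into a dict keyed by the two-segment prefix, splits the path and resolves it by a single dict lookup, keeping the osgi guard and the short Vol/Util fallbacks.
import Mathlib
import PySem

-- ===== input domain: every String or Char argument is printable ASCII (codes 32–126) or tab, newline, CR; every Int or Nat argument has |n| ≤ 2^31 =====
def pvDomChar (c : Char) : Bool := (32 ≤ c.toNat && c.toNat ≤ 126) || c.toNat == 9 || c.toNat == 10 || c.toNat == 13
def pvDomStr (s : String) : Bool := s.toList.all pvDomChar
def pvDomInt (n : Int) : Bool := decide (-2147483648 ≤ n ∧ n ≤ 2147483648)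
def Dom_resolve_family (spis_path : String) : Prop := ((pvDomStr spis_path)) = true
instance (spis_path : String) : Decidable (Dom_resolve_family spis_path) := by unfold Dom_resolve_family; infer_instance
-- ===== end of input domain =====

-- B replaces A's ordered scan over the 41 prefix rules by one dict lookup keyed on the path's
-- first two segments; the dict is parsed once from a compact text table (idiomatic; same
-- return value wherever the Python A returns).

-- ===== PORT A =====
def familyRules : List (String × String × String) := [
  ("Surf/Material/", "surf_material", "Surf/Material"),
  ("Surf/SurfInteract/", "surf_interact", "Surf/SurfInteract"),
  ("Surf/SurfDistrib/", "surf_distrib", "Surf/SurfDistrib"),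
  ("Surf/SurfField/", "surf_field", "Surf/SurfField"),
  ("Surf/SurfMesh/", "surf_mesh", "Surf/SurfMesh"),
  ("Circ/CircField/", "circ_circfield", "Circ/CircField"),
  ("Circ/DIDV/", "circ_didv", "Circ/DIDV"),
  ("Circ/Circ/", "circ_circuit", "Circ/Circ"),
  ("Solver/Circuit/", "solver_circuit", "Solver/Circuit"),
  ("Solver/ElectroMag/", "solver_electromag", "Solver/ElectroMag"),
  ("Solver/Matter/", "solver_matter", "Solver/Matter"),
  ("Solver/Util/", "solver_util", "Solver/Util"),
  ("Top/Transition/", "top_transition", "Top/Transition"),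
  ("Top/Simulation/", "top_simulation", "Top/Simulation"),
  ("Top/Plasma/", "top_plasma", "Top/Plasma"),
  ("Top/SC/", "top_sc", "Top/SC"),
  ("Top/Grid/", "top_grid", "Top/Grid"),
  ("Top/Default/", "top_default", "Top/Default"),
  ("Top/Top/", "top_top", "Top/Top"),
  ("Util/DistribFunc/", "util_distrib_func", "Util/DistribFunc"),
  ("Util/Exception/", "util_exception", "Util/Exception"),
  ("Util/Instrument/", "util_instrument", "Util/Instrument"),
  ("Util/Func/", "util_func", "Util/Func"),
  ("Util/Part/", "util_part", "Util/Part"),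
  ("Util/Phys/", "util_phys", "Util/Phys"),
  ("Util/Sampler/", "util_sampler", "Util/Sampler"),
  ("Util/Monitor/", "util_monitor", "Util/Monitor"),
  ("Util/io/", "util_io", "Util/io"),
  ("Util/Table/", "util_table", "Util/Table"),
  ("Util/Matrix/", "util_matrix", "Util/Matrix"),
  ("Util/Vect/", "util_vect", "Util/Vect"),
  ("Util/List/", "util_list", "Util/List"),
  ("Util/OcTreeMesh/", "util_octree_mesh", "Util/OcTreeMesh"),
  ("Util/OcTree/", "util_octree", "Util/OcTree"),
  ("Vol/BC/", "vol_bc_abstract", "Vol/BC(Abstract)"),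
  ("Vol/VolField/", "vol_field_abstract", "Vol/VolField(Abstract)"),
  ("Vol/VolDistrib/", "vol_distrib_long_tail", "Vol/VolDistrib(LongTail)"),
  ("Vol/VolInteract/", "vol_interact_long_tail", "Vol/VolInteract(LongTail)"),
  ("Vol/Geom/", "vol_geom", "Vol/Geom"),
  ("Vol/VolMesh/", "vol_mesh", "Vol/VolMesh"),
  ("Vol/", "vol_full_stack", "Vol/BC+Field+Distrib+Interact")]

def findRule : List (String × String × String) → String → Option (String × String)
  | [], _ => none
  | (p, fid, fname) :: rest, s =>
      if PySem.Str.startswith s p then some (fid, fname) else findRule rest s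

def resolve_family (spis_path : String) : String × String :=
  if PySem.Str.startswith spis_path "osgi/" then ("osgi_out_of_scope", "osgi")
  else
    match findRule familyRules spis_path with
    | some v => v
    | none =>
        if PySem.Str.startswith spis_path "Util/" then ("util_full_stack", "Util/**")
        else ("", "")  -- Python raises ValueError here; excluded by Pre_resolve_family

-- ===== PORT B =====
-- the rule table as Python B keeps it: "key id name" text lines
def tableLines : List String := [
  "Surf/Material surf_material Surf/Material",
  "Surf/SurfInteract surf_interact Surf/SurfInteract",
  "Surf/SurfDistrib surf_distrib Surf/SurfDistrib",
  "Surf/SurfField surf_field Surf/SurfField",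
  "Surf/SurfMesh surf_mesh Surf/SurfMesh",
  "Circ/CircField circ_circfield Circ/CircField",
  "Circ/DIDV circ_didv Circ/DIDV",
  "Circ/Circ circ_circuit Circ/Circ",
  "Solver/Circuit solver_circuit Solver/Circuit",
  "Solver/ElectroMag solver_electromag Solver/ElectroMag",
  "Solver/Matter solver_matter Solver/Matter",
  "Solver/Util solver_util Solver/Util",
  "Top/Transition top_transition Top/Transition",
  "Top/Simulation top_simulation Top/Simulation",
  "Top/Plasma top_plasma Top/Plasma",
  "Top/SC top_sc Top/SC",
  "Top/Grid top_grid Top/Grid",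
  "Top/Default top_default Top/Default",
  "Top/Top top_top Top/Top",
  "Util/DistribFunc util_distrib_func Util/DistribFunc",
  "Util/Exception util_exception Util/Exception",
  "Util/Instrument util_instrument Util/Instrument",
  "Util/Func util_func Util/Func",
  "Util/Part util_part Util/Part",
  "Util/Phys util_phys Util/Phys",
  "Util/Sampler util_sampler Util/Sampler",
  "Util/Monitor util_monitor Util/Monitor",
  "Util/io util_io Util/io",
  "Util/Table util_table Util/Table",
  "Util/Matrix util_matrix Util/Matrix",
  "Util/Vect util_vect Util/Vect",
  "Util/List util_list Util/List",
  "Util/OcTreeMesh util_octree_mesh Util/OcTreeMesh",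
  "Util/OcTree util_octree Util/OcTree",
  "Vol/BC vol_bc_abstract Vol/BC(Abstract)",
  "Vol/VolField vol_field_abstract Vol/VolField(Abstract)",
  "Vol/VolDistrib vol_distrib_long_tail Vol/VolDistrib(LongTail)",
  "Vol/VolInteract vol_interact_long_tail Vol/VolInteract(LongTail)",
  "Vol/Geom vol_geom Vol/Geom",
  "Vol/VolMesh vol_mesh Vol/VolMesh"]

-- _load_table: for each line, fields = line.split(); table[key] = (fid, fname)
-- (every line of the fixed table has exactly three fields, so the catch-all arm is never hit)
def familyByKey : PySem.Dict (List Char) (String × String) :=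
  tableLines.foldl
    (fun table line =>
      match PySem.Chars.split₀ line.toList with
      | [key, fid, fname] => table.insert key (String.ofList fid, String.ofList fname)
      | _ => table)
    (PySem.Dict.mk [])

def resolve_family_alt (spis_path : String) : String × String :=
  if PySem.Str.startswith spis_path "osgi/" then ("osgi_out_of_scope", "osgi")
  else
    -- parts = spis_path.split("/")
    let parts := PySem.Chars.splitOn spis_path.toList ['/']
    -- if len(parts) >= 3: hit = _FAMILY_BY_KEY.get(parts[0] + "/" + parts[1])
    let hit : Option (String × String) :=
      if 3 ≤ parts.length then
        PySem.Dict.get? familyByKey (parts.getD 0 [] ++ ('/' :: parts.getD 1 []))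
      else none
    match hit with
    | some v => v
    | none =>
        if PySem.Str.startswith spis_path "Vol/" then ("vol_full_stack", "Vol/BC+Field+Distrib+Interact")
        else if PySem.Str.startswith spis_path "Util/" then ("util_full_stack", "Util/**")
        else ("", "")  -- Python raises ValueError here; excluded by Pre_resolve_family

-- ===== PRECONDITION & SPEC =====
-- Pre_ excludes exactly the inputs on which the Python A raises ValueError: paths that
-- start with none of the prefixes listed below (the family-rule prefixes plus the osgi
-- guard and the Util fallback prefix).
def Pre_resolve_family (spis_path : String) : Prop :=
  (["osgi/", "Util/", "Vol/",
    "Surf/Material/", "Surf/SurfInteract/", "Surf/SurfDistrib/", "Surf/SurfField/", "Surf/SurfMesh/", "Circ/CircField/", "Circ/DIDV/", "Circ/Circ/", "Solver/Circuit/", "Solver/ElectroMag/", "Solver/Matter/", "Solver/Util/", "Top/Transition/", "Top/Simulation/", "Top/Plasma/", "Top/SC/", "Top/Grid/", "Top/Default/", "Top/Top/"].any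
    (fun p => PySem.Str.startswith spis_path p)) = true
instance (spis_path : String) : Decidable (Pre_resolve_family spis_path) := by
  unfold Pre_resolve_family; infer_instance

def pvWitness_resolve_family : String := "Surf/Material/NascapMaterial.java"

def Spec_resolve_family (spis_path : String) (out : String × String) : Prop := out = resolve_family_alt spis_path
instance (spis_path : String) (out : String × String) : Decidable (Spec_resolve_family spis_path out) := by unfold Spec_resolve_family; infer_instance

-- ===== CLAIM (what is proved, stated in full; the proofs are below) =====
def Claim_equal_resolve_family : Prop := ∀ (spis_path : String), Dom_resolve_family spis_path → Pre_resolve_family spis_path → Spec_resolve_family spis_path (resolve_family spis_path)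

-- ===== LEMMAS AND PROOFS =====

-- the parsed table, written out (checked by kernel evaluation of the parsing fold)
def familyByKeyLit : PySem.Dict (List Char) (String × String) := PySem.Dict.mk [
  ("Surf/Material".toList, ("surf_material", "Surf/Material")),
  ("Surf/SurfInteract".toList, ("surf_interact", "Surf/SurfInteract")),
  ("Surf/SurfDistrib".toList, ("surf_distrib", "Surf/SurfDistrib")),
  ("Surf/SurfField".toList, ("surf_field", "Surf/SurfField")),
  ("Surf/SurfMesh".toList, ("surf_mesh", "Surf/SurfMesh")),
  ("Circ/CircField".toList, ("circ_circfield", "Circ/CircField")),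
  ("Circ/DIDV".toList, ("circ_didv", "Circ/DIDV")),
  ("Circ/Circ".toList, ("circ_circuit", "Circ/Circ")),
  ("Solver/Circuit".toList, ("solver_circuit", "Solver/Circuit")),
  ("Solver/ElectroMag".toList, ("solver_electromag", "Solver/ElectroMag")),
  ("Solver/Matter".toList, ("solver_matter", "Solver/Matter")),
  ("Solver/Util".toList, ("solver_util", "Solver/Util")),
  ("Top/Transition".toList, ("top_transition", "Top/Transition")),
  ("Top/Simulation".toList, ("top_simulation", "Top/Simulation")),
  ("Top/Plasma".toList, ("top_plasma", "Top/Plasma")),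
  ("Top/SC".toList, ("top_sc", "Top/SC")),
  ("Top/Grid".toList, ("top_grid", "Top/Grid")),
  ("Top/Default".toList, ("top_default", "Top/Default")),
  ("Top/Top".toList, ("top_top", "Top/Top")),
  ("Util/DistribFunc".toList, ("util_distrib_func", "Util/DistribFunc")),
  ("Util/Exception".toList, ("util_exception", "Util/Exception")),
  ("Util/Instrument".toList, ("util_instrument", "Util/Instrument")),
  ("Util/Func".toList, ("util_func", "Util/Func")),
  ("Util/Part".toList, ("util_part", "Util/Part")),
  ("Util/Phys".toList, ("util_phys", "Util/Phys")),
  ("Util/Sampler".toList, ("util_sampler", "Util/Sampler")),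
  ("Util/Monitor".toList, ("util_monitor", "Util/Monitor")),
  ("Util/io".toList, ("util_io", "Util/io")),
  ("Util/Table".toList, ("util_table", "Util/Table")),
  ("Util/Matrix".toList, ("util_matrix", "Util/Matrix")),
  ("Util/Vect".toList, ("util_vect", "Util/Vect")),
  ("Util/List".toList, ("util_list", "Util/List")),
  ("Util/OcTreeMesh".toList, ("util_octree_mesh", "Util/OcTreeMesh")),
  ("Util/OcTree".toList, ("util_octree", "Util/OcTree")),
  ("Vol/BC".toList, ("vol_bc_abstract", "Vol/BC(Abstract)")),
  ("Vol/VolField".toList, ("vol_field_abstract", "Vol/VolField(Abstract)")),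
  ("Vol/VolDistrib".toList, ("vol_distrib_long_tail", "Vol/VolDistrib(LongTail)")),
  ("Vol/VolInteract".toList, ("vol_interact_long_tail", "Vol/VolInteract(LongTail)")),
  ("Vol/Geom".toList, ("vol_geom", "Vol/Geom")),
  ("Vol/VolMesh".toList, ("vol_mesh", "Vol/VolMesh"))]

set_option maxRecDepth 16384 in
set_option maxHeartbeats 4000000 in
lemma familyByKey_eq : familyByKey = familyByKeyLit := by decide

def mySplit : List Char → List (List Char)
  | [] => [[]]
  | c :: t =>
    if c = '/' then [] :: mySplit t
    else
      match mySplit t with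
      | [] => [[c]]
      | x :: xs => (c :: x) :: xs

def consHead (p : List Char) : List (List Char) → List (List Char)
  | [] => [p]
  | x :: xs => (p ++ x) :: xs

lemma mySplit_ne_nil (cs : List Char) : mySplit cs ≠ [] := by
  cases cs with
  | nil => simp [mySplit]
  | cons c t =>
    simp only [mySplit]
    by_cases h : c = '/'
    · simp [h]
    · simp only [if_neg h]
      cases hm : mySplit t <;> simp

lemma charsDecomp (cs : List Char) : ('/' ∉ cs) ∨ ∃ a u, '/' ∉ a ∧ cs = a ++ ('/' :: u) := by
  induction cs with
  | nil => left; simp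
  | cons c t ih =>
    by_cases hc : c = '/'
    · right; exact ⟨[], t, by simp, by simp [hc]⟩
    · rcases ih with h | ⟨a, u, ha, rfl⟩
      · left; simp [h, Ne.symm hc]
      · right
        exact ⟨c :: a, u, by simp [ha, Ne.symm hc], rfl⟩

lemma sepInj : ∀ (a X : List Char), '/' ∉ a → '/' ∉ X → ∀ u t : List Char,
    a ++ ('/' :: u) = X ++ ('/' :: t) → a = X ∧ u = t := by
  intro a
  induction a with
  | nil =>
    intro X _ hX u t h
    cases X with
    | nil => simpa using h
    | cons x xs =>
      simp only [List.nil_append, List.cons_append, List.cons.injEq] at h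
      exact absurd h.1.symm (fun he => hX (he ▸ List.mem_cons_self))
  | cons c ct ih =>
    intro X hc hX u t h
    cases X with
    | nil =>
      simp only [List.cons_append, List.nil_append, List.cons.injEq] at h
      exact absurd h.1 (fun he => hc (he ▸ List.mem_cons_self))
    | cons x xs =>
      simp only [List.cons_append, List.cons.injEq] at h
      obtain ⟨rfl, h2⟩ := h
      have hr := ih xs (fun hm => hc (List.mem_cons_of_mem _ hm))
        (fun hm => hX (List.mem_cons_of_mem _ hm)) u t h2
      exact ⟨by rw [hr.1], hr.2⟩

lemma swNoSlash {cs p : List Char} (h : '/' ∉ cs) (hp : '/' ∈ p) :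
    PySem.Chars.startswith cs p = false := by
  rw [Bool.eq_false_iff]
  intro hsw
  exact h (((PySem.Chars.startswith_iff cs p).mp hsw).subset hp)

lemma swStrip (l s p : List Char) :
    PySem.Chars.startswith (l ++ s) (l ++ p) = PySem.Chars.startswith s p := by
  induction l with
  | nil => simp
  | cons c t ih => simpa [PySem.Chars.startswith, List.isPrefixOf] using ih

lemma swOne {a u X : List Char} (ha : '/' ∉ a) (hX : '/' ∉ X) :
    PySem.Chars.startswith (a ++ ('/' :: u)) (X ++ ['/']) = decide (a = X) := by
  by_cases h : a = X
  · subst h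
    rw [(PySem.Chars.startswith_iff _ _).mpr ⟨u, by simp⟩]
    simp
  · rw [decide_eq_false h, Bool.eq_false_iff]
    intro hsw
    obtain ⟨w, hw⟩ := (PySem.Chars.startswith_iff _ _).mp hsw
    rw [List.append_assoc] at hw
    exact h ((sepInj a X ha hX u w hw.symm).1)

lemma swTwo {a b r X Y : List Char} (ha : '/' ∉ a) (hb : '/' ∉ b) (hX : '/' ∉ X) (hY : '/' ∉ Y) :
    PySem.Chars.startswith (a ++ ('/' :: (b ++ ('/' :: r)))) (X ++ ('/' :: (Y ++ ['/'])))
      = (decide (a = X) && decide (b = Y)) := by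
  by_cases h1 : a = X
  · subst h1
    have e : ∀ x : List Char, a ++ ('/' :: x) = (a ++ ['/']) ++ x := by intro x; simp
    rw [e (b ++ ('/' :: r)), e (Y ++ ['/']), swStrip, swOne hb hY]
    simp
  · simp only [decide_eq_false h1, Bool.false_and, Bool.eq_false_iff]
    intro hsw
    obtain ⟨w, hw⟩ := (PySem.Chars.startswith_iff _ _).mp hsw
    simp only [List.append_assoc, List.cons_append] at hw
    exact h1 ((sepInj a X ha hX _ _ hw.symm).1)

lemma swTwoMiss {a u X Y : List Char} (ha : '/' ∉ a) (hu : '/' ∉ u) (hX : '/' ∉ X) (hY : '/' ∉ Y) :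
    PySem.Chars.startswith (a ++ ('/' :: u)) (X ++ ('/' :: (Y ++ ['/']))) = false := by
  rw [Bool.eq_false_iff]
  intro hsw
  obtain ⟨w, hw⟩ := (PySem.Chars.startswith_iff _ _).mp hsw
  simp only [List.append_assoc, List.cons_append] at hw
  have h2 := (sepInj X a hX ha _ _ hw).2
  exact hu (by rw [← h2]; simp)

lemma go_spec : ∀ (fuel : Nat) (l cur : List Char) (acc : List (List Char)), l.length < fuel →
    PySem.Chars.splitOn.go ['/'] fuel l cur acc = acc.reverse ++ consHead cur.reverse (mySplit l) := by
  intro fuel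
  induction fuel with
  | zero => intro l cur acc h; exact absurd h (Nat.not_lt_zero _)
  | succ n ih =>
    intro l cur acc h
    cases l with
    | nil => simp [PySem.Chars.splitOn.go, mySplit, consHead]
    | cons c rest =>
      have hstep : PySem.Chars.splitOn.go ['/'] (n+1) (c :: rest) cur acc =
          if ['/'].isPrefixOf (c :: rest) then
            PySem.Chars.splitOn.go ['/'] n (List.drop 1 (c :: rest)) [] (cur.reverse :: acc)
          else PySem.Chars.splitOn.go ['/'] n rest (c :: cur) acc := by
        simp [PySem.Chars.splitOn.go]
      rw [hstep]
      by_cases hc : c = '/'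
      · rw [if_pos (by simp [List.isPrefixOf, hc])]
        rw [List.drop_one, List.tail_cons]
        rw [ih rest [] (cur.reverse :: acc) (by simpa using Nat.lt_of_succ_lt_succ h)]
        cases hm : mySplit rest with
        | nil => exact absurd hm (mySplit_ne_nil rest)
        | cons x xs => simp [mySplit, hc, consHead, hm]
      · rw [if_neg (by simp [List.isPrefixOf, Ne.symm hc])]
        rw [ih rest (c :: cur) acc (by simpa using Nat.lt_of_succ_lt_succ h)]
        cases hm : mySplit rest with
        | nil => exact absurd hm (mySplit_ne_nil rest)
        | cons x xs => simp [mySplit, hc, consHead, hm]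

lemma splitOn_eq_mySplit (cs : List Char) : PySem.Chars.splitOn cs ['/'] = mySplit cs := by
  unfold PySem.Chars.splitOn
  rw [go_spec (cs.length + 1) cs [] [] (Nat.lt_succ_self _)]
  cases hm : mySplit cs with
  | nil => exact absurd hm (mySplit_ne_nil cs)
  | cons x xs => simp [consHead]

lemma mySplit_no_slash {cs : List Char} (h : '/' ∉ cs) : mySplit cs = [cs] := by
  induction cs with
  | nil => rfl
  | cons c t ih =>
    have hc : c ≠ '/' := fun he => h (he ▸ List.mem_cons_self)
    have ht : '/' ∉ t := fun hm => h (List.mem_cons_of_mem _ hm)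
    simp [mySplit, hc, ih ht]

lemma mySplit_sep {a : List Char} (u : List Char) (ha : '/' ∉ a) :
    mySplit (a ++ ('/' :: u)) = a :: mySplit u := by
  induction a with
  | nil => simp [mySplit]
  | cons c t ih =>
    have hc : c ≠ '/' := fun he => ha (he ▸ List.mem_cons_self)
    have ht : '/' ∉ t := fun hm => ha (List.mem_cons_of_mem _ hm)
    simp [mySplit, hc, ih ht]


lemma swS_noSlash {s : String} (h : '/' ∉ s.toList) (P : String) (hp : '/' ∈ P.toList) :
    PySem.Str.startswith s P = false := by
  rw [PySem.Str.startswith_eq]; exact swNoSlash h hp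

lemma swS_one {s : String} {a u : List Char} (hcs : s.toList = a ++ ('/' :: u)) (ha : '/' ∉ a)
    (P : String) (X : List Char) (hP : P.toList = X ++ ['/']) (hX : '/' ∉ X) :
    PySem.Str.startswith s P = decide (a = X) := by
  rw [PySem.Str.startswith_eq, hcs, hP]; exact swOne ha hX

lemma swS_two {s : String} {a b r : List Char} (hcs : s.toList = a ++ ('/' :: (b ++ ('/' :: r))))
    (ha : '/' ∉ a) (hb : '/' ∉ b) (P : String) (X Y : List Char)
    (hP : P.toList = X ++ ('/' :: (Y ++ ['/']))) (hX : '/' ∉ X) (hY : '/' ∉ Y) :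
    PySem.Str.startswith s P = (decide (a = X) && decide (b = Y)) := by
  rw [PySem.Str.startswith_eq, hcs, hP]; exact swTwo ha hb hX hY

lemma swS_twoMiss {s : String} {a u : List Char} (hcs : s.toList = a ++ ('/' :: u))
    (ha : '/' ∉ a) (hu : '/' ∉ u) (P : String) (X Y : List Char)
    (hP : P.toList = X ++ ('/' :: (Y ++ ['/']))) (hX : '/' ∉ X) (hY : '/' ∉ Y) :
    PySem.Str.startswith s P = false := by
  rw [PySem.Str.startswith_eq, hcs, hP]; exact swTwoMiss ha hu hX hY

lemma dictGetNil {κ ν : Type} [BEq κ] (k : κ) :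
    (PySem.Dict.mk ([] : List (κ × ν))).get? k = none := rfl

lemma keyS {a b : List Char} (ha : '/' ∉ a) (K : String) (X Y : List Char)
    (hK : K.toList = X ++ ('/' :: Y)) (hX : '/' ∉ X) :
    (K.toList == a ++ ('/' :: b)) = (decide (a = X) && decide (b = Y)) := by
  have hiff : (K.toList = a ++ ('/' :: b)) ↔ (a = X ∧ b = Y) := by
    rw [hK]
    constructor
    · intro h
      have h2 := sepInj X a hX ha Y b h
      exact ⟨h2.1.symm, h2.2.symm⟩
    · intro h; rw [h.1, h.2]
  by_cases h1 : a = X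
  · subst h1
    by_cases h2 : b = Y
    · simp [hiff.mpr ⟨rfl, h2⟩, h2]
    · have hne : K.toList ≠ a ++ ('/' :: b) := fun h => h2 (hiff.mp h).2
      simp [hne, h2]
  · have hne : K.toList ≠ a ++ ('/' :: b) := fun h => h1 (hiff.mp h).1
    simp [hne, h1]

theorem resolve_family_eq (s : String) : resolve_family s = resolve_family_alt s := by
  rcases charsDecomp s.toList with h0 | ⟨a, u, ha, hcs⟩
  · -- no '/' in the path: every test is false, both sides fall through identically
    simp only [resolve_family, resolve_family_alt, findRule, familyRules]
    rw [splitOn_eq_mySplit, mySplit_no_slash h0]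
    rw [swS_noSlash h0 "osgi/" (by decide),
        swS_noSlash h0 "Surf/Material/" (by decide),
        swS_noSlash h0 "Surf/SurfInteract/" (by decide),
        swS_noSlash h0 "Surf/SurfDistrib/" (by decide),
        swS_noSlash h0 "Surf/SurfField/" (by decide),
        swS_noSlash h0 "Surf/SurfMesh/" (by decide),
        swS_noSlash h0 "Circ/CircField/" (by decide),
        swS_noSlash h0 "Circ/DIDV/" (by decide),
        swS_noSlash h0 "Circ/Circ/" (by decide),
        swS_noSlash h0 "Solver/Circuit/" (by decide),
        swS_noSlash h0 "Solver/ElectroMag/" (by decide),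
        swS_noSlash h0 "Solver/Matter/" (by decide),
        swS_noSlash h0 "Solver/Util/" (by decide),
        swS_noSlash h0 "Top/Transition/" (by decide),
        swS_noSlash h0 "Top/Simulation/" (by decide),
        swS_noSlash h0 "Top/Plasma/" (by decide),
        swS_noSlash h0 "Top/SC/" (by decide),
        swS_noSlash h0 "Top/Grid/" (by decide),
        swS_noSlash h0 "Top/Default/" (by decide),
        swS_noSlash h0 "Top/Top/" (by decide),
        swS_noSlash h0 "Util/DistribFunc/" (by decide),
        swS_noSlash h0 "Util/Exception/" (by decide),
        swS_noSlash h0 "Util/Instrument/" (by decide),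
        swS_noSlash h0 "Util/Func/" (by decide),
        swS_noSlash h0 "Util/Part/" (by decide),
        swS_noSlash h0 "Util/Phys/" (by decide),
        swS_noSlash h0 "Util/Sampler/" (by decide),
        swS_noSlash h0 "Util/Monitor/" (by decide),
        swS_noSlash h0 "Util/io/" (by decide),
        swS_noSlash h0 "Util/Table/" (by decide),
        swS_noSlash h0 "Util/Matrix/" (by decide),
        swS_noSlash h0 "Util/Vect/" (by decide),
        swS_noSlash h0 "Util/List/" (by decide),
        swS_noSlash h0 "Util/OcTreeMesh/" (by decide),
        swS_noSlash h0 "Util/OcTree/" (by decide),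
        swS_noSlash h0 "Vol/BC/" (by decide),
        swS_noSlash h0 "Vol/VolField/" (by decide),
        swS_noSlash h0 "Vol/VolDistrib/" (by decide),
        swS_noSlash h0 "Vol/VolInteract/" (by decide),
        swS_noSlash h0 "Vol/Geom/" (by decide),
        swS_noSlash h0 "Vol/VolMesh/" (by decide),
        swS_noSlash h0 "Vol/" (by decide),
        swS_noSlash h0 "Util/" (by decide)]
    simp
  · rcases charsDecomp u with hu | ⟨b, r, hb, rfl⟩
    · -- one '/'-separated head only: no two-segment key can match
      simp only [resolve_family, resolve_family_alt, findRule, familyRules]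
      rw [show PySem.Chars.splitOn s.toList ['/'] = [a, u] from by
            rw [hcs, splitOn_eq_mySplit, mySplit_sep u ha, mySplit_no_slash hu]]
      rw [swS_twoMiss hcs ha hu "Surf/Material/" ['S', 'u', 'r', 'f'] ['M', 'a', 't', 'e', 'r', 'i', 'a', 'l'] (by decide) (by decide) (by decide),
          swS_twoMiss hcs ha hu "Surf/SurfInteract/" ['S', 'u', 'r', 'f'] ['S', 'u', 'r', 'f', 'I', 'n', 't', 'e', 'r', 'a', 'c', 't'] (by decide) (by decide) (by decide),
          swS_twoMiss hcs ha hu "Surf/SurfDistrib/" ['S', 'u', 'r', 'f'] ['S', 'u', 'r', 'f', 'D', 'i', 's', 't', 'r', 'i', 'b'] (by decide) (by decide) (by decide),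
          swS_twoMiss hcs ha hu "Surf/SurfField/" ['S', 'u', 'r', 'f'] ['S', 'u', 'r', 'f', 'F', 'i', 'e', 'l', 'd'] (by decide) (by decide) (by decide),
          swS_twoMiss hcs ha hu "Surf/SurfMesh/" ['S', 'u', 'r', 'f'] ['S', 'u', 'r', 'f', 'M', 'e', 's', 'h'] (by decide) (by decide) (by decide),
          swS_twoMiss hcs ha hu "Circ/CircField/" ['C', 'i', 'r', 'c'] ['C', 'i', 'r', 'c', 'F', 'i', 'e', 'l', 'd'] (by decide) (by decide) (by decide),
          swS_twoMiss hcs ha hu "Circ/DIDV/" ['C', 'i', 'r', 'c'] ['D', 'I', 'D', 'V'] (by decide) (by decide) (by decide),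
          swS_twoMiss hcs ha hu "Circ/Circ/" ['C', 'i', 'r', 'c'] ['C', 'i', 'r', 'c'] (by decide) (by decide) (by decide),
          swS_twoMiss hcs ha hu "Solver/Circuit/" ['S', 'o', 'l', 'v', 'e', 'r'] ['C', 'i', 'r', 'c', 'u', 'i', 't'] (by decide) (by decide) (by decide),
          swS_twoMiss hcs ha hu "Solver/ElectroMag/" ['S', 'o', 'l', 'v', 'e', 'r'] ['E', 'l', 'e', 'c', 't', 'r', 'o', 'M', 'a', 'g'] (by decide) (by decide) (by decide),
          swS_twoMiss hcs ha hu "Solver/Matter/" ['S', 'o', 'l', 'v', 'e', 'r'] ['M', 'a', 't', 't', 'e', 'r'] (by decide) (by decide) (by decide),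
          swS_twoMiss hcs ha hu "Solver/Util/" ['S', 'o', 'l', 'v', 'e', 'r'] ['U', 't', 'i', 'l'] (by decide) (by decide) (by decide),
          swS_twoMiss hcs ha hu "Top/Transition/" ['T', 'o', 'p'] ['T', 'r', 'a', 'n', 's', 'i', 't', 'i', 'o', 'n'] (by decide) (by decide) (by decide),
          swS_twoMiss hcs ha hu "Top/Simulation/" ['T', 'o', 'p'] ['S', 'i', 'm', 'u', 'l', 'a', 't', 'i', 'o', 'n'] (by decide) (by decide) (by decide),
          swS_twoMiss hcs ha hu "Top/Plasma/" ['T', 'o', 'p'] ['P', 'l', 'a', 's', 'm', 'a'] (by decide) (by decide) (by decide),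
          swS_twoMiss hcs ha hu "Top/SC/" ['T', 'o', 'p'] ['S', 'C'] (by decide) (by decide) (by decide),
          swS_twoMiss hcs ha hu "Top/Grid/" ['T', 'o', 'p'] ['G', 'r', 'i', 'd'] (by decide) (by decide) (by decide),
          swS_twoMiss hcs ha hu "Top/Default/" ['T', 'o', 'p'] ['D', 'e', 'f', 'a', 'u', 'l', 't'] (by decide) (by decide) (by decide),
          swS_twoMiss hcs ha hu "Top/Top/" ['T', 'o', 'p'] ['T', 'o', 'p'] (by decide) (by decide) (by decide),
          swS_twoMiss hcs ha hu "Util/DistribFunc/" ['U', 't', 'i', 'l'] ['D', 'i', 's', 't', 'r', 'i', 'b', 'F', 'u', 'n', 'c'] (by decide) (by decide) (by decide),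
          swS_twoMiss hcs ha hu "Util/Exception/" ['U', 't', 'i', 'l'] ['E', 'x', 'c', 'e', 'p', 't', 'i', 'o', 'n'] (by decide) (by decide) (by decide),
          swS_twoMiss hcs ha hu "Util/Instrument/" ['U', 't', 'i', 'l'] ['I', 'n', 's', 't', 'r', 'u', 'm', 'e', 'n', 't'] (by decide) (by decide) (by decide),
          swS_twoMiss hcs ha hu "Util/Func/" ['U', 't', 'i', 'l'] ['F', 'u', 'n', 'c'] (by decide) (by decide) (by decide),
          swS_twoMiss hcs ha hu "Util/Part/" ['U', 't', 'i', 'l'] ['P', 'a', 'r', 't'] (by decide) (by decide) (by decide),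
          swS_twoMiss hcs ha hu "Util/Phys/" ['U', 't', 'i', 'l'] ['P', 'h', 'y', 's'] (by decide) (by decide) (by decide),
          swS_twoMiss hcs ha hu "Util/Sampler/" ['U', 't', 'i', 'l'] ['S', 'a', 'm', 'p', 'l', 'e', 'r'] (by decide) (by decide) (by decide),
          swS_twoMiss hcs ha hu "Util/Monitor/" ['U', 't', 'i', 'l'] ['M', 'o', 'n', 'i', 't', 'o', 'r'] (by decide) (by decide) (by decide),
          swS_twoMiss hcs ha hu "Util/io/" ['U', 't', 'i', 'l'] ['i', 'o'] (by decide) (by decide) (by decide),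
          swS_twoMiss hcs ha hu "Util/Table/" ['U', 't', 'i', 'l'] ['T', 'a', 'b', 'l', 'e'] (by decide) (by decide) (by decide),
          swS_twoMiss hcs ha hu "Util/Matrix/" ['U', 't', 'i', 'l'] ['M', 'a', 't', 'r', 'i', 'x'] (by decide) (by decide) (by decide),
          swS_twoMiss hcs ha hu "Util/Vect/" ['U', 't', 'i', 'l'] ['V', 'e', 'c', 't'] (by decide) (by decide) (by decide),
          swS_twoMiss hcs ha hu "Util/List/" ['U', 't', 'i', 'l'] ['L', 'i', 's', 't'] (by decide) (by decide) (by decide),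
          swS_twoMiss hcs ha hu "Util/OcTreeMesh/" ['U', 't', 'i', 'l'] ['O', 'c', 'T', 'r', 'e', 'e', 'M', 'e', 's', 'h'] (by decide) (by decide) (by decide),
          swS_twoMiss hcs ha hu "Util/OcTree/" ['U', 't', 'i', 'l'] ['O', 'c', 'T', 'r', 'e', 'e'] (by decide) (by decide) (by decide),
          swS_twoMiss hcs ha hu "Vol/BC/" ['V', 'o', 'l'] ['B', 'C'] (by decide) (by decide) (by decide),
          swS_twoMiss hcs ha hu "Vol/VolField/" ['V', 'o', 'l'] ['V', 'o', 'l', 'F', 'i', 'e', 'l', 'd'] (by decide) (by decide) (by decide),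
          swS_twoMiss hcs ha hu "Vol/VolDistrib/" ['V', 'o', 'l'] ['V', 'o', 'l', 'D', 'i', 's', 't', 'r', 'i', 'b'] (by decide) (by decide) (by decide),
          swS_twoMiss hcs ha hu "Vol/VolInteract/" ['V', 'o', 'l'] ['V', 'o', 'l', 'I', 'n', 't', 'e', 'r', 'a', 'c', 't'] (by decide) (by decide) (by decide),
          swS_twoMiss hcs ha hu "Vol/Geom/" ['V', 'o', 'l'] ['G', 'e', 'o', 'm'] (by decide) (by decide) (by decide),
          swS_twoMiss hcs ha hu "Vol/VolMesh/" ['V', 'o', 'l'] ['V', 'o', 'l', 'M', 'e', 's', 'h'] (by decide) (by decide) (by decide),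
          swS_one hcs ha "osgi/" ['o', 's', 'g', 'i'] (by decide) (by decide),
          swS_one hcs ha "Vol/" ['V', 'o', 'l'] (by decide) (by decide),
          swS_one hcs ha "Util/" ['U', 't', 'i', 'l'] (by decide) (by decide)]
      by_cases g1 : a = ['o', 's', 'g', 'i']
      · simp [g1]
      · by_cases g2 : a = ['V', 'o', 'l']
        · simp [g1, g2]
        · by_cases g3 : a = ['U', 't', 'i', 'l'] <;> simp [g1, g2, g3]
    · -- at least two '/'-separated segments: the two-segment key decides everything
      simp only [resolve_family, resolve_family_alt, findRule, familyRules, familyByKey_eq,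
        familyByKeyLit, PySem.Dict.get?_mk_cons, dictGetNil]
      rw [show PySem.Chars.splitOn s.toList ['/'] = a :: b :: mySplit r from by
            rw [hcs, splitOn_eq_mySplit, mySplit_sep (b ++ ('/' :: r)) ha, mySplit_sep r hb]]
      have hlen : 3 ≤ (a :: b :: mySplit r).length := by
        have hpos : 0 < (mySplit r).length := List.length_pos_iff.mpr (mySplit_ne_nil r)
        simp only [List.length_cons]; omega
      rw [if_pos hlen]
      simp only [List.getD_cons_zero, List.getD_cons_succ]
      rw [keyS ha "Surf/Material" ['S', 'u', 'r', 'f'] ['M', 'a', 't', 'e', 'r', 'i', 'a', 'l'] (by decide) (by decide),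
          keyS ha "Surf/SurfInteract" ['S', 'u', 'r', 'f'] ['S', 'u', 'r', 'f', 'I', 'n', 't', 'e', 'r', 'a', 'c', 't'] (by decide) (by decide),
          keyS ha "Surf/SurfDistrib" ['S', 'u', 'r', 'f'] ['S', 'u', 'r', 'f', 'D', 'i', 's', 't', 'r', 'i', 'b'] (by decide) (by decide),
          keyS ha "Surf/SurfField" ['S', 'u', 'r', 'f'] ['S', 'u', 'r', 'f', 'F', 'i', 'e', 'l', 'd'] (by decide) (by decide),
          keyS ha "Surf/SurfMesh" ['S', 'u', 'r', 'f'] ['S', 'u', 'r', 'f', 'M', 'e', 's', 'h'] (by decide) (by decide),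
          keyS ha "Circ/CircField" ['C', 'i', 'r', 'c'] ['C', 'i', 'r', 'c', 'F', 'i', 'e', 'l', 'd'] (by decide) (by decide),
          keyS ha "Circ/DIDV" ['C', 'i', 'r', 'c'] ['D', 'I', 'D', 'V'] (by decide) (by decide),
          keyS ha "Circ/Circ" ['C', 'i', 'r', 'c'] ['C', 'i', 'r', 'c'] (by decide) (by decide),
          keyS ha "Solver/Circuit" ['S', 'o', 'l', 'v', 'e', 'r'] ['C', 'i', 'r', 'c', 'u', 'i', 't'] (by decide) (by decide),
          keyS ha "Solver/ElectroMag" ['S', 'o', 'l', 'v', 'e', 'r'] ['E', 'l', 'e', 'c', 't', 'r', 'o', 'M', 'a', 'g'] (by decide) (by decide),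
          keyS ha "Solver/Matter" ['S', 'o', 'l', 'v', 'e', 'r'] ['M', 'a', 't', 't', 'e', 'r'] (by decide) (by decide),
          keyS ha "Solver/Util" ['S', 'o', 'l', 'v', 'e', 'r'] ['U', 't', 'i', 'l'] (by decide) (by decide),
          keyS ha "Top/Transition" ['T', 'o', 'p'] ['T', 'r', 'a', 'n', 's', 'i', 't', 'i', 'o', 'n'] (by decide) (by decide),
          keyS ha "Top/Simulation" ['T', 'o', 'p'] ['S', 'i', 'm', 'u', 'l', 'a', 't', 'i', 'o', 'n'] (by decide) (by decide),
          keyS ha "Top/Plasma" ['T', 'o', 'p'] ['P', 'l', 'a', 's', 'm', 'a'] (by decide) (by decide),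
          keyS ha "Top/SC" ['T', 'o', 'p'] ['S', 'C'] (by decide) (by decide),
          keyS ha "Top/Grid" ['T', 'o', 'p'] ['G', 'r', 'i', 'd'] (by decide) (by decide),
          keyS ha "Top/Default" ['T', 'o', 'p'] ['D', 'e', 'f', 'a', 'u', 'l', 't'] (by decide) (by decide),
          keyS ha "Top/Top" ['T', 'o', 'p'] ['T', 'o', 'p'] (by decide) (by decide),
          keyS ha "Util/DistribFunc" ['U', 't', 'i', 'l'] ['D', 'i', 's', 't', 'r', 'i', 'b', 'F', 'u', 'n', 'c'] (by decide) (by decide),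
          keyS ha "Util/Exception" ['U', 't', 'i', 'l'] ['E', 'x', 'c', 'e', 'p', 't', 'i', 'o', 'n'] (by decide) (by decide),
          keyS ha "Util/Instrument" ['U', 't', 'i', 'l'] ['I', 'n', 's', 't', 'r', 'u', 'm', 'e', 'n', 't'] (by decide) (by decide),
          keyS ha "Util/Func" ['U', 't', 'i', 'l'] ['F', 'u', 'n', 'c'] (by decide) (by decide),
          keyS ha "Util/Part" ['U', 't', 'i', 'l'] ['P', 'a', 'r', 't'] (by decide) (by decide),
          keyS ha "Util/Phys" ['U', 't', 'i', 'l'] ['P', 'h', 'y', 's'] (by decide) (by decide),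
          keyS ha "Util/Sampler" ['U', 't', 'i', 'l'] ['S', 'a', 'm', 'p', 'l', 'e', 'r'] (by decide) (by decide),
          keyS ha "Util/Monitor" ['U', 't', 'i', 'l'] ['M', 'o', 'n', 'i', 't', 'o', 'r'] (by decide) (by decide),
          keyS ha "Util/io" ['U', 't', 'i', 'l'] ['i', 'o'] (by decide) (by decide),
          keyS ha "Util/Table" ['U', 't', 'i', 'l'] ['T', 'a', 'b', 'l', 'e'] (by decide) (by decide),
          keyS ha "Util/Matrix" ['U', 't', 'i', 'l'] ['M', 'a', 't', 'r', 'i', 'x'] (by decide) (by decide),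
          keyS ha "Util/Vect" ['U', 't', 'i', 'l'] ['V', 'e', 'c', 't'] (by decide) (by decide),
          keyS ha "Util/List" ['U', 't', 'i', 'l'] ['L', 'i', 's', 't'] (by decide) (by decide),
          keyS ha "Util/OcTreeMesh" ['U', 't', 'i', 'l'] ['O', 'c', 'T', 'r', 'e', 'e', 'M', 'e', 's', 'h'] (by decide) (by decide),
          keyS ha "Util/OcTree" ['U', 't', 'i', 'l'] ['O', 'c', 'T', 'r', 'e', 'e'] (by decide) (by decide),
          keyS ha "Vol/BC" ['V', 'o', 'l'] ['B', 'C'] (by decide) (by decide),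
          keyS ha "Vol/VolField" ['V', 'o', 'l'] ['V', 'o', 'l', 'F', 'i', 'e', 'l', 'd'] (by decide) (by decide),
          keyS ha "Vol/VolDistrib" ['V', 'o', 'l'] ['V', 'o', 'l', 'D', 'i', 's', 't', 'r', 'i', 'b'] (by decide) (by decide),
          keyS ha "Vol/VolInteract" ['V', 'o', 'l'] ['V', 'o', 'l', 'I', 'n', 't', 'e', 'r', 'a', 'c', 't'] (by decide) (by decide),
          keyS ha "Vol/Geom" ['V', 'o', 'l'] ['G', 'e', 'o', 'm'] (by decide) (by decide),
          keyS ha "Vol/VolMesh" ['V', 'o', 'l'] ['V', 'o', 'l', 'M', 'e', 's', 'h'] (by decide) (by decide),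
          swS_two hcs ha hb "Surf/Material/" ['S', 'u', 'r', 'f'] ['M', 'a', 't', 'e', 'r', 'i', 'a', 'l'] (by decide) (by decide) (by decide),
          swS_two hcs ha hb "Surf/SurfInteract/" ['S', 'u', 'r', 'f'] ['S', 'u', 'r', 'f', 'I', 'n', 't', 'e', 'r', 'a', 'c', 't'] (by decide) (by decide) (by decide),
          swS_two hcs ha hb "Surf/SurfDistrib/" ['S', 'u', 'r', 'f'] ['S', 'u', 'r', 'f', 'D', 'i', 's', 't', 'r', 'i', 'b'] (by decide) (by decide) (by decide),
          swS_two hcs ha hb "Surf/SurfField/" ['S', 'u', 'r', 'f'] ['S', 'u', 'r', 'f', 'F', 'i', 'e', 'l', 'd'] (by decide) (by decide) (by decide),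
          swS_two hcs ha hb "Surf/SurfMesh/" ['S', 'u', 'r', 'f'] ['S', 'u', 'r', 'f', 'M', 'e', 's', 'h'] (by decide) (by decide) (by decide),
          swS_two hcs ha hb "Circ/CircField/" ['C', 'i', 'r', 'c'] ['C', 'i', 'r', 'c', 'F', 'i', 'e', 'l', 'd'] (by decide) (by decide) (by decide),
          swS_two hcs ha hb "Circ/DIDV/" ['C', 'i', 'r', 'c'] ['D', 'I', 'D', 'V'] (by decide) (by decide) (by decide),
          swS_two hcs ha hb "Circ/Circ/" ['C', 'i', 'r', 'c'] ['C', 'i', 'r', 'c'] (by decide) (by decide) (by decide),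
          swS_two hcs ha hb "Solver/Circuit/" ['S', 'o', 'l', 'v', 'e', 'r'] ['C', 'i', 'r', 'c', 'u', 'i', 't'] (by decide) (by decide) (by decide),
          swS_two hcs ha hb "Solver/ElectroMag/" ['S', 'o', 'l', 'v', 'e', 'r'] ['E', 'l', 'e', 'c', 't', 'r', 'o', 'M', 'a', 'g'] (by decide) (by decide) (by decide),
          swS_two hcs ha hb "Solver/Matter/" ['S', 'o', 'l', 'v', 'e', 'r'] ['M', 'a', 't', 't', 'e', 'r'] (by decide) (by decide) (by decide),
          swS_two hcs ha hb "Solver/Util/" ['S', 'o', 'l', 'v', 'e', 'r'] ['U', 't', 'i', 'l'] (by decide) (by decide) (by decide),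
          swS_two hcs ha hb "Top/Transition/" ['T', 'o', 'p'] ['T', 'r', 'a', 'n', 's', 'i', 't', 'i', 'o', 'n'] (by decide) (by decide) (by decide),
          swS_two hcs ha hb "Top/Simulation/" ['T', 'o', 'p'] ['S', 'i', 'm', 'u', 'l', 'a', 't', 'i', 'o', 'n'] (by decide) (by decide) (by decide),
          swS_two hcs ha hb "Top/Plasma/" ['T', 'o', 'p'] ['P', 'l', 'a', 's', 'm', 'a'] (by decide) (by decide) (by decide),
          swS_two hcs ha hb "Top/SC/" ['T', 'o', 'p'] ['S', 'C'] (by decide) (by decide) (by decide),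
          swS_two hcs ha hb "Top/Grid/" ['T', 'o', 'p'] ['G', 'r', 'i', 'd'] (by decide) (by decide) (by decide),
          swS_two hcs ha hb "Top/Default/" ['T', 'o', 'p'] ['D', 'e', 'f', 'a', 'u', 'l', 't'] (by decide) (by decide) (by decide),
          swS_two hcs ha hb "Top/Top/" ['T', 'o', 'p'] ['T', 'o', 'p'] (by decide) (by decide) (by decide),
          swS_two hcs ha hb "Util/DistribFunc/" ['U', 't', 'i', 'l'] ['D', 'i', 's', 't', 'r', 'i', 'b', 'F', 'u', 'n', 'c'] (by decide) (by decide) (by decide),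
          swS_two hcs ha hb "Util/Exception/" ['U', 't', 'i', 'l'] ['E', 'x', 'c', 'e', 'p', 't', 'i', 'o', 'n'] (by decide) (by decide) (by decide),
          swS_two hcs ha hb "Util/Instrument/" ['U', 't', 'i', 'l'] ['I', 'n', 's', 't', 'r', 'u', 'm', 'e', 'n', 't'] (by decide) (by decide) (by decide),
          swS_two hcs ha hb "Util/Func/" ['U', 't', 'i', 'l'] ['F', 'u', 'n', 'c'] (by decide) (by decide) (by decide),
          swS_two hcs ha hb "Util/Part/" ['U', 't', 'i', 'l'] ['P', 'a', 'r', 't'] (by decide) (by decide) (by decide),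
          swS_two hcs ha hb "Util/Phys/" ['U', 't', 'i', 'l'] ['P', 'h', 'y', 's'] (by decide) (by decide) (by decide),
          swS_two hcs ha hb "Util/Sampler/" ['U', 't', 'i', 'l'] ['S', 'a', 'm', 'p', 'l', 'e', 'r'] (by decide) (by decide) (by decide),
          swS_two hcs ha hb "Util/Monitor/" ['U', 't', 'i', 'l'] ['M', 'o', 'n', 'i', 't', 'o', 'r'] (by decide) (by decide) (by decide),
          swS_two hcs ha hb "Util/io/" ['U', 't', 'i', 'l'] ['i', 'o'] (by decide) (by decide) (by decide),
          swS_two hcs ha hb "Util/Table/" ['U', 't', 'i', 'l'] ['T', 'a', 'b', 'l', 'e'] (by decide) (by decide) (by decide),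
          swS_two hcs ha hb "Util/Matrix/" ['U', 't', 'i', 'l'] ['M', 'a', 't', 'r', 'i', 'x'] (by decide) (by decide) (by decide),
          swS_two hcs ha hb "Util/Vect/" ['U', 't', 'i', 'l'] ['V', 'e', 'c', 't'] (by decide) (by decide) (by decide),
          swS_two hcs ha hb "Util/List/" ['U', 't', 'i', 'l'] ['L', 'i', 's', 't'] (by decide) (by decide) (by decide),
          swS_two hcs ha hb "Util/OcTreeMesh/" ['U', 't', 'i', 'l'] ['O', 'c', 'T', 'r', 'e', 'e', 'M', 'e', 's', 'h'] (by decide) (by decide) (by decide),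
          swS_two hcs ha hb "Util/OcTree/" ['U', 't', 'i', 'l'] ['O', 'c', 'T', 'r', 'e', 'e'] (by decide) (by decide) (by decide),
          swS_two hcs ha hb "Vol/BC/" ['V', 'o', 'l'] ['B', 'C'] (by decide) (by decide) (by decide),
          swS_two hcs ha hb "Vol/VolField/" ['V', 'o', 'l'] ['V', 'o', 'l', 'F', 'i', 'e', 'l', 'd'] (by decide) (by decide) (by decide),
          swS_two hcs ha hb "Vol/VolDistrib/" ['V', 'o', 'l'] ['V', 'o', 'l', 'D', 'i', 's', 't', 'r', 'i', 'b'] (by decide) (by decide) (by decide),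
          swS_two hcs ha hb "Vol/VolInteract/" ['V', 'o', 'l'] ['V', 'o', 'l', 'I', 'n', 't', 'e', 'r', 'a', 'c', 't'] (by decide) (by decide) (by decide),
          swS_two hcs ha hb "Vol/Geom/" ['V', 'o', 'l'] ['G', 'e', 'o', 'm'] (by decide) (by decide) (by decide),
          swS_two hcs ha hb "Vol/VolMesh/" ['V', 'o', 'l'] ['V', 'o', 'l', 'M', 'e', 's', 'h'] (by decide) (by decide) (by decide),
          swS_one hcs ha "osgi/" ['o', 's', 'g', 'i'] (by decide) (by decide),
          swS_one hcs ha "Vol/" ['V', 'o', 'l'] (by decide) (by decide),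
          swS_one hcs ha "Util/" ['U', 't', 'i', 'l'] (by decide) (by decide)]
      by_cases g0 : a = ['o', 's', 'g', 'i']
      · simp [g0]
      ·
        by_cases g1 : a = ['S', 'u', 'r', 'f']
        · -- a = Surf: decide on the second segment
          by_cases h1_1 : b = ['M', 'a', 't', 'e', 'r', 'i', 'a', 'l']
          · simp [g1, h1_1]
          ·
            by_cases h1_2 : b = ['S', 'u', 'r', 'f', 'I', 'n', 't', 'e', 'r', 'a', 'c', 't']
            · simp [g1, h1_2]
            ·
              by_cases h1_3 : b = ['S', 'u', 'r', 'f', 'D', 'i', 's', 't', 'r', 'i', 'b']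
              · simp [g1, h1_3]
              ·
                by_cases h1_4 : b = ['S', 'u', 'r', 'f', 'F', 'i', 'e', 'l', 'd']
                · simp [g1, h1_4]
                ·
                  by_cases h1_5 : b = ['S', 'u', 'r', 'f', 'M', 'e', 's', 'h']
                  · simp [g1, h1_5]
                  ·
                    simp [g1, h1_1, h1_2, h1_3, h1_4, h1_5]
        ·
          by_cases g2 : a = ['C', 'i', 'r', 'c']
          · -- a = Circ: decide on the second segment
            by_cases h2_1 : b = ['C', 'i', 'r', 'c', 'F', 'i', 'e', 'l', 'd']
            · simp [g2, h2_1]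
            ·
              by_cases h2_2 : b = ['D', 'I', 'D', 'V']
              · simp [g2, h2_2]
              ·
                by_cases h2_3 : b = ['C', 'i', 'r', 'c']
                · simp [g2, h2_3]
                ·
                  simp [g2, h2_1, h2_2, h2_3]
          ·
            by_cases g3 : a = ['S', 'o', 'l', 'v', 'e', 'r']
            · -- a = Solver: decide on the second segment
              by_cases h3_1 : b = ['C', 'i', 'r', 'c', 'u', 'i', 't']
              · simp [g3, h3_1]
              ·
                by_cases h3_2 : b = ['E', 'l', 'e', 'c', 't', 'r', 'o', 'M', 'a', 'g']
                · simp [g3, h3_2]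
                ·
                  by_cases h3_3 : b = ['M', 'a', 't', 't', 'e', 'r']
                  · simp [g3, h3_3]
                  ·
                    by_cases h3_4 : b = ['U', 't', 'i', 'l']
                    · simp [g3, h3_4]
                    ·
                      simp [g3, h3_1, h3_2, h3_3, h3_4]
            ·
              by_cases g4 : a = ['T', 'o', 'p']
              · -- a = Top: decide on the second segment
                by_cases h4_1 : b = ['T', 'r', 'a', 'n', 's', 'i', 't', 'i', 'o', 'n']
                · simp [g4, h4_1]
                ·
                  by_cases h4_2 : b = ['S', 'i', 'm', 'u', 'l', 'a', 't', 'i', 'o', 'n']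
                  · simp [g4, h4_2]
                  ·
                    by_cases h4_3 : b = ['P', 'l', 'a', 's', 'm', 'a']
                    · simp [g4, h4_3]
                    ·
                      by_cases h4_4 : b = ['S', 'C']
                      · simp [g4, h4_4]
                      ·
                        by_cases h4_5 : b = ['G', 'r', 'i', 'd']
                        · simp [g4, h4_5]
                        ·
                          by_cases h4_6 : b = ['D', 'e', 'f', 'a', 'u', 'l', 't']
                          · simp [g4, h4_6]
                          ·
                            by_cases h4_7 : b = ['T', 'o', 'p']
                            · simp [g4, h4_7]
                            ·
                              simp [g4, h4_1, h4_2, h4_3, h4_4, h4_5, h4_6, h4_7]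
              ·
                by_cases g5 : a = ['U', 't', 'i', 'l']
                · -- a = Util: decide on the second segment
                  by_cases h5_1 : b = ['D', 'i', 's', 't', 'r', 'i', 'b', 'F', 'u', 'n', 'c']
                  · simp [g5, h5_1]
                  ·
                    by_cases h5_2 : b = ['E', 'x', 'c', 'e', 'p', 't', 'i', 'o', 'n']
                    · simp [g5, h5_2]
                    ·
                      by_cases h5_3 : b = ['I', 'n', 's', 't', 'r', 'u', 'm', 'e', 'n', 't']
                      · simp [g5, h5_3]
                      ·
                        by_cases h5_4 : b = ['F', 'u', 'n', 'c']
                        · simp [g5, h5_4]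
                        ·
                          by_cases h5_5 : b = ['P', 'a', 'r', 't']
                          · simp [g5, h5_5]
                          ·
                            by_cases h5_6 : b = ['P', 'h', 'y', 's']
                            · simp [g5, h5_6]
                            ·
                              by_cases h5_7 : b = ['S', 'a', 'm', 'p', 'l', 'e', 'r']
                              · simp [g5, h5_7]
                              ·
                                by_cases h5_8 : b = ['M', 'o', 'n', 'i', 't', 'o', 'r']
                                · simp [g5, h5_8]
                                ·
                                  by_cases h5_9 : b = ['i', 'o']
                                  · simp [g5, h5_9]
                                  ·
                                    by_cases h5_10 : b = ['T', 'a', 'b', 'l', 'e']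
                                    · simp [g5, h5_10]
                                    ·
                                      by_cases h5_11 : b = ['M', 'a', 't', 'r', 'i', 'x']
                                      · simp [g5, h5_11]
                                      ·
                                        by_cases h5_12 : b = ['V', 'e', 'c', 't']
                                        · simp [g5, h5_12]
                                        ·
                                          by_cases h5_13 : b = ['L', 'i', 's', 't']
                                          · simp [g5, h5_13]
                                          ·
                                            by_cases h5_14 : b = ['O', 'c', 'T', 'r', 'e', 'e', 'M', 'e', 's', 'h']
                                            · simp [g5, h5_14]
                                            ·
                                              by_cases h5_15 : b = ['O', 'c', 'T', 'r', 'e', 'e']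
                                              · simp [g5, h5_15]
                                              ·
                                                simp [g5, h5_1, h5_2, h5_3, h5_4, h5_5, h5_6, h5_7, h5_8, h5_9, h5_10, h5_11, h5_12, h5_13, h5_14, h5_15]
                ·
                  by_cases g6 : a = ['V', 'o', 'l']
                  · -- a = Vol: decide on the second segment
                    by_cases h6_1 : b = ['B', 'C']
                    · simp [g6, h6_1]
                    ·
                      by_cases h6_2 : b = ['V', 'o', 'l', 'F', 'i', 'e', 'l', 'd']
                      · simp [g6, h6_2]
                      ·
                        by_cases h6_3 : b = ['V', 'o', 'l', 'D', 'i', 's', 't', 'r', 'i', 'b']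
                        · simp [g6, h6_3]
                        ·
                          by_cases h6_4 : b = ['V', 'o', 'l', 'I', 'n', 't', 'e', 'r', 'a', 'c', 't']
                          · simp [g6, h6_4]
                          ·
                            by_cases h6_5 : b = ['G', 'e', 'o', 'm']
                            · simp [g6, h6_5]
                            ·
                              by_cases h6_6 : b = ['V', 'o', 'l', 'M', 'e', 's', 'h']
                              · simp [g6, h6_6]
                              ·
                                simp [g6, h6_1, h6_2, h6_3, h6_4, h6_5, h6_6]
                  ·
                    simp [g0, g1, g2, g3, g4, g5, g6]

-- ===== VERDICT (by name: the statement is the Claim_ definition above) =====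
theorem resolve_family_spec : Claim_equal_resolve_family := by
  intro spis_path _ _
  unfold Spec_resolve_family
  exact resolve_family_eq spis_path
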